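-- pv_equiv track=rewrite | github.com/Sherab7/CSF101CAP | CAP1_02230117.py | calculate_perfect_score
-- ===== SOURCE A (Python) =====
-- def calculate_perfect_score(game_results):
--     # Initialize perfect score to 0
--     perfect_score = 0
--     # Iterate through each game result
--     for figure, outcome in game_results:
--         # Determine the score for each figure-outcome combination and add it to the perfect score
--         if figure == "A":
--             perfect_score += 3 if outcome == "X" else 4 if outcome == "Y" else 8
--         elif figure == "B":
--             perfect_score += 1 if outcome == "X" else 5 if outcome == "Y" else 9
--         else:
--             perfect_score += 2 if outcome == "X" else 6 if outcome == "Y" else 7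
--     # Return the perfect score
--     return perfect_score
-- ===== SOURCE B (Python) =====
-- _TABLE = [[3, 4, 8], [1, 5, 9], [2, 6, 7]]
-- _ROW = {"A": 0, "B": 1}
-- _COL = {"X": 0, "Y": 1}
--
--
-- def calculate_perfect_score(game_results):
--     # Aggregate first: count each distinct (figure, outcome) pair once,
--     # then score each distinct pair via a 2-D table and weight by its count.
--     counts = {}
--     for pair in game_results:
--         counts[pair] = counts.get(pair, 0) + 1
--     return sum(_TABLE[_ROW.get(f, 2)][_COL.get(o, 2)] * n
--                for (f, o), n in counts.items())
-- ===== Notes on version B (the rewrite author's own statement) =====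
-- stated objective: alternative
-- what changed: Replaces the per-element if/elif cascade and running accumulator with a counting dict built in one pass plus a 2-D score table: each distinct (figure, outcome) pair is scored once and weighted by its multiplicity.
import Mathlib
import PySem

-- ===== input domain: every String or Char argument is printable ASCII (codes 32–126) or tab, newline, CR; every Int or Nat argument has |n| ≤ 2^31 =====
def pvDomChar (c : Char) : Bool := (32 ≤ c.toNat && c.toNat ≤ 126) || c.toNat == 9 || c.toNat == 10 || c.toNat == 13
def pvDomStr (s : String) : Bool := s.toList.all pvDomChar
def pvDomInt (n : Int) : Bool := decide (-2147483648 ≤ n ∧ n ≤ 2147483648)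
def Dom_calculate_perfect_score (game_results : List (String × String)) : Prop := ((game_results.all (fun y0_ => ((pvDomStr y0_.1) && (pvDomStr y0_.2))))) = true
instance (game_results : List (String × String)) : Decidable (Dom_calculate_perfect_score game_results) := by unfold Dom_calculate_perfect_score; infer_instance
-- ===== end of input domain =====

-- B replaces A's per-element if/elif cascade with a counting dict plus a 2-D score
-- table, scoring each distinct pair once weighted by its count (alternative, same cost).


-- ===== PORT A =====
def calculate_perfect_score (game_results : List (String × String)) : Int :=
  game_results.foldl
    (fun perfect_score fo =>
      let figure := fo.1
      let outcome := fo.2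
      if figure = "A" then
        perfect_score + (if outcome = "X" then 3 else if outcome = "Y" then 4 else 8)
      else if figure = "B" then
        perfect_score + (if outcome = "X" then 1 else if outcome = "Y" then 5 else 9)
      else
        perfect_score + (if outcome = "X" then 2 else if outcome = "Y" then 6 else 7))
    0

-- ===== PORT B =====
def pvTable : List (List Int) := [[3, 4, 8], [1, 5, 9], [2, 6, 7]]
def pvRowMap : PySem.Dict String Int := PySem.Dict.ofList [("A", 0), ("B", 1)]
def pvColMap : PySem.Dict String Int := PySem.Dict.ofList [("X", 0), ("Y", 1)]

-- _TABLE[_ROW.get(f, 2)][_COL.get(o, 2)]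
def pvScore (f o : String) : Int :=
  PySem.List.pyGetD (PySem.List.pyGetD pvTable (pvRowMap.getD f 2) [])
    (pvColMap.getD o 2) 0

def calculate_perfect_score_alt (game_results : List (String × String)) : Int :=
  let counts := game_results.foldl (fun d pair => d.modify pair 0 (· + 1)) PySem.Dict.empty
  (counts.items.map (fun kn => pvScore kn.1.1 kn.1.2 * kn.2)).sum

-- ===== PRECONDITION & SPEC =====
def Spec_calculate_perfect_score (game_results : List (String × String)) (out : Int) : Prop := out = calculate_perfect_score_alt game_results
instance (game_results : List (String × String)) (out : Int) : Decidable (Spec_calculate_perfect_score game_results out) := by unfold Spec_calculate_perfect_score; infer_instance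

-- ===== CLAIM (what is proved, stated in full; the proofs are below) =====
def Claim_equal_calculate_perfect_score : Prop := ∀ (game_results : List (String × String)), Dom_calculate_perfect_score game_results → Spec_calculate_perfect_score game_results (calculate_perfect_score game_results)

-- ===== LEMMAS AND PROOFS =====

lemma pvRow_getD (f : String) :
    pvRowMap.getD f 2 = if f = "A" then 0 else if f = "B" then 1 else 2 := by
  have hR : pvRowMap = ⟨[("A", (0 : Int)), ("B", 1)]⟩ := rfl
  by_cases h1 : f = "A"
  · simp [hR, PySem.Dict.getD, PySem.Dict.get?, h1]
  · by_cases h2 : f = "B"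
    · simp [hR, PySem.Dict.getD, PySem.Dict.get?, h2]
    · have h1' : ("A" : String) ≠ f := fun h => h1 h.symm
      have h2' : ("B" : String) ≠ f := fun h => h2 h.symm
      simp [hR, PySem.Dict.getD, PySem.Dict.get?, h1, h2, h1', h2']

lemma pvCol_getD (o : String) :
    pvColMap.getD o 2 = if o = "X" then 0 else if o = "Y" then 1 else 2 := by
  have hC : pvColMap = ⟨[("X", (0 : Int)), ("Y", 1)]⟩ := rfl
  by_cases h1 : o = "X"
  · simp [hC, PySem.Dict.getD, PySem.Dict.get?, h1]
  · by_cases h2 : o = "Y"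
    · simp [hC, PySem.Dict.getD, PySem.Dict.get?, h2]
    · have h1' : ("X" : String) ≠ o := fun h => h1 h.symm
      have h2' : ("Y" : String) ≠ o := fun h => h2 h.symm
      simp [hC, PySem.Dict.getD, PySem.Dict.get?, h1, h2, h1', h2']

-- B's table lookup computes exactly A's cascade score for a single pair.
lemma pvScore_eq (f o : String) :
    pvScore f o =
      if f = "A" then (if o = "X" then 3 else if o = "Y" then 4 else 8)
      else if f = "B" then (if o = "X" then 1 else if o = "Y" then 5 else 9)
      else (if o = "X" then 2 else if o = "Y" then 6 else 7) := by
  unfold pvScore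
  rw [pvRow_getD, pvCol_getD]
  split_ifs <;> rfl

-- summing the score over distinct pairs weighted by multiplicity = summing it per element
lemma pvDistinctSum (xs : List (String × String)) (g : String × String → Int) :
    ((PySem.Set.ofList xs).map (fun k => g k * xs.count k)).sum = (xs.map g).sum := by
  have hnd := PySem.Set.nodup_ofList (xs := xs)
  have hfin : (PySem.Set.ofList xs).toFinset = xs.toFinset := by
    ext k; simp [PySem.Set.mem_ofList]
  rw [← List.sum_toFinset _ hnd, hfin, Finset.sum_list_map_count]
  refine Finset.sum_congr rfl ?_
  intro m _
  simp [mul_comm]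
  left
  simp [List.count_eq_countP]
  apply List.countP_congr
  intro x _
  simp

-- ===== VERDICT (by name: the statement is the Claim_ definition above) =====
theorem calculate_perfect_score_spec : Claim_equal_calculate_perfect_score := by
  intro xs _
  unfold Spec_calculate_perfect_score
  have hB : calculate_perfect_score_alt xs =
      ((PySem.Dict.counter xs).items.map (fun kn => pvScore kn.1.1 kn.1.2 * kn.2)).sum := by
    unfold calculate_perfect_score_alt
    rw [← PySem.Dict.counter_eq_foldl]
  have hA : calculate_perfect_score xs = xs.foldl (fun s p => s + pvScore p.1 p.2) 0 := by
    unfold calculate_perfect_score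
    congr 1
    funext s p
    simp only [pvScore_eq]
    split_ifs <;> simp_all
  rw [hA, hB, PySem.Dict.items_counter, List.map_map, PySem.List.foldl_add, zero_add,
    ← pvDistinctSum xs (fun p => pvScore p.1 p.2)]
  rfl
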